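-- pv_equiv track=rewrite | github.com/FrankNicoMol/AdventOfCode | 2023/day07.py | hand_combo
-- ===== SOURCE A (Python) =====
-- def hand_combo(cards, joker):
--
--     sets = [cards.count(card) for card in set(cards)]
--     if 'J' in cards and joker:
--         val = cards.count('J')
--         sets[sets.index(val)] = 0
--         sets.sort(reverse = True)
--         sets[0] += val
--     else:
--         sets.sort(reverse=True)
--     sets += [0]*(len(cards) - len(sets))
--
--     return sets
-- ===== SOURCE B (Python) =====
-- def hand_combo(cards, joker):
--     # B sorts the hand and reads the counts off as run lengths of the sorted
--     # sequence (two-pointer scan), extracting the joker run during the same scan,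
--     # instead of hashing with set()/count() and the zero-then-resort trick.
--     s = sorted(cards)
--     jc = 0
--     counts = []
--     i, n = 0, len(s)
--     while i < n:
--         j = i + 1
--         while j < n and s[j] == s[i]:
--             j += 1
--         if joker and s[i] == 'J':
--             jc = j - i
--         else:
--             counts.append(j - i)
--         i = j
--     counts.sort(reverse=True)
--     if jc:
--         counts = [counts[0] + jc] + counts[1:] if counts else [jc]
--     return counts + [0] * (len(cards) - len(counts))
-- ===== Notes on version B (the rewrite author's own statement) =====
-- stated objective: alternative
-- what changed: B sorts the hand and reads the counts off as run lengths of the sorted sequence with a two-pointer scan (extracting the joker run during that scan), instead of A's hashing with set(cards) plus a .count scan per distinct card and the zero-the-matching-count-then-resort trick.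
import Mathlib
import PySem

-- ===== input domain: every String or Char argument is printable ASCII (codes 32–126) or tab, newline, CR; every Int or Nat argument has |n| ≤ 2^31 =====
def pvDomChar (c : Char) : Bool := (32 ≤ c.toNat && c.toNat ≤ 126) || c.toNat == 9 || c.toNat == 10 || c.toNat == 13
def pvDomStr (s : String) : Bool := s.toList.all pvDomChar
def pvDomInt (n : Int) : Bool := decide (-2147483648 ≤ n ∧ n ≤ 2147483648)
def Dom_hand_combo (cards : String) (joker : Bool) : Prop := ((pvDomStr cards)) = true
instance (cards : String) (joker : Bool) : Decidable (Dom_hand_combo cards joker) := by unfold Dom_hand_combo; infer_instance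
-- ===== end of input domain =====

-- B sorts the hand and derives the counts as run lengths of the sorted sequence
-- (two-pointer scan, joker run extracted during the scan), instead of A's
-- set()+.count hashing and zero-the-matching-count-then-resort trick.

-- ===== PORT A =====
-- `for card in set(cards)` is ported in PySem.Set.ofList (first-occurrence) order; the
-- returned value does not depend on the set's iteration order: the multiset of counts is
-- order-free and the joker branch zeroes one count equal to `val`, which yields the same
-- multiset whichever equal count is hit.
-- `sets.index(val)` always succeeds here (val is 'J''s own count, present in sets), so the
-- `.getD 0` default is never taken; likewise `sets[0]` is in range ('J' ∈ cards ⇒ sets ≠ []).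
def hand_combo (cards : String) (joker : Bool) : List Int :=
  let cl := cards.toList
  let sets : List Int := (PySem.Set.ofList cl).map (fun card => (cl.count card : Int))
  let sets :=
    if cl.contains 'J' && joker then
      let val : Int := (cl.count 'J' : Int)
      let sets := sets.set ((PySem.List.index? sets val).getD 0) 0
      let sets := PySem.List.sorted sets (fun x => x) true
      PySem.List.pySetD sets 0 (PySem.List.pyGetD sets 0 0 + val)
    else
      PySem.List.sorted sets (fun x => x) true
  sets ++ List.replicate (cl.length - sets.length) 0

-- ===== PORT B =====
-- the `while i < n` / `while j < n and s[j] == s[i]` two-pointer scan of Source B: one run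
-- per step (run = takeWhile, the rest = dropWhile), carrying (jc, counts)
def pvScan (joker : Bool) : List Char → Int × List Int
  | [] => (0, [])
  | c :: t =>
    if joker && (c == 'J') then
      (((t.takeWhile (fun d => d == c)).length : Int) + 1,
       (pvScan joker (t.dropWhile (fun d => d == c))).2)
    else
      ((pvScan joker (t.dropWhile (fun d => d == c))).1,
       (((t.takeWhile (fun d => d == c)).length : Int) + 1) ::
         (pvScan joker (t.dropWhile (fun d => d == c))).2)
  termination_by l => l.length
  decreasing_by
    all_goals
      exact Nat.lt_succ_of_le (List.length_dropWhile_le _ _)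

def hand_combo_alt (cards : String) (joker : Bool) : List Int :=
  let s := PySem.List.sorted cards.toList (fun c => c) false
  let scan := pvScan joker s
  let jc := scan.1
  let counts := PySem.List.sorted scan.2 (fun x => x) true
  let counts :=
    if jc ≠ 0 then
      match counts with
      | c0 :: ct => (c0 + jc) :: ct
      | [] => [jc]
    else counts
  counts ++ List.replicate (cards.toList.length - counts.length) 0

-- ===== PRECONDITION & SPEC =====
def Spec_hand_combo (cards : String) (joker : Bool) (out : List Int) : Prop := out = hand_combo_alt cards joker
instance (cards : String) (joker : Bool) (out : List Int) : Decidable (Spec_hand_combo cards joker out) := by unfold Spec_hand_combo; infer_instance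

-- ===== CLAIM (what is proved, stated in full; the proofs are below) =====
def Claim_equal_hand_combo : Prop := ∀ (cards : String) (joker : Bool), Dom_hand_combo cards joker → Spec_hand_combo cards joker (hand_combo cards joker)

-- ===== LEMMAS AND PROOFS =====

-- a descending sort of an Int list depends only on its multiset of elements
theorem sortedDesc_eq_of_perm (xs ys : List Int) (h : xs.Perm ys) :
    PySem.List.sorted xs (fun x => x) true = PySem.List.sorted ys (fun x => x) true := by
  apply PySem.List.eq_of_perm_of_pairwise_le_of_injective (fun x : Int => -x) neg_injective
  · exact ((PySem.List.sorted_perm xs _ true).trans h).trans (PySem.List.sorted_perm ys _ true).symm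
  · exact (PySem.List.sorted_pairwise_rev xs _).imp (fun h => by omega)
  · exact (PySem.List.sorted_pairwise_rev ys _).imp (fun h => by omega)

theorem sortedDesc_append_zero (M : List Int) (hM : ∀ x ∈ M, 0 ≤ x) :
    PySem.List.sorted (M ++ [0]) (fun x => x) true
      = PySem.List.sorted M (fun x => x) true ++ [0] := by
  apply PySem.List.eq_of_perm_of_pairwise_le_of_injective (fun x : Int => -x) neg_injective
  · exact (PySem.List.sorted_perm _ _ true).trans ((PySem.List.sorted_perm M _ true).append_right [0]).symm
  · exact (PySem.List.sorted_pairwise_rev _ _).imp (fun h => by omega)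
  · rw [List.pairwise_append]
    refine ⟨(PySem.List.sorted_pairwise_rev M _).imp (fun h => by omega), by simp, ?_⟩
    intro a ha b hb
    simp at hb
    have := hM a ((PySem.List.mem_sorted M _ true a).mp ha)
    omega

theorem set_index_zero_perm (l : List Int) (val : Int) (hv : val ∈ l) :
    (l.set ((PySem.List.index? l val).getD 0) 0).Perm (0 :: l.erase val) := by
  obtain ⟨k, hk⟩ := Option.isSome_iff_exists.mp ((PySem.List.index?_isSome_iff l val).mpr hv)
  obtain ⟨pre, suf, rfl, rfl, hpre⟩ := (PySem.List.index?_eq_some_iff l val k).mp hk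
  rw [hk]
  simp only [Option.getD_some, List.set_append, lt_irrefl, if_false, Nat.sub_self,
    List.set_cons_zero, List.erase_append_right _ (by simpa using hpre)]
  rw [List.erase_cons_head]
  exact List.perm_middle

theorem ofList_aux {α : Type} [BEq α] (l : List α) (s : List α) :
    (List.foldl PySem.Set.add s l).length ≤ s.length + l.length := by
  induction l generalizing s with
  | nil => simp
  | cons x t ih =>
    refine (ih (PySem.Set.add s x)).trans ?_
    have : (PySem.Set.add s x).length ≤ s.length + 1 := by
      unfold PySem.Set.add
      split <;> simp
    simp only [List.length_cons]
    omega

theorem ofList_length_le {α : Type} [BEq α] (l : List α) :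
    (PySem.Set.ofList l).length ≤ l.length := by
  have := ofList_aux l []
  rw [← PySem.Set.ofList_eq_foldl] at this
  simpa using this

-- c does not survive its own run: dropWhile (== c) of a sorted tail everything ≥ c has no c
theorem not_mem_dropWhile_beq (c : Char) :
    ∀ (t : List Char), (∀ d ∈ t, c ≤ d) → t.Pairwise (· ≤ ·) →
      c ∉ t.dropWhile (fun d => d == c) := by
  intro t
  induction t with
  | nil => simp
  | cons x xs ih =>
    intro hge hp
    by_cases hx : (x == c) = true
    · rw [List.dropWhile_cons, if_pos hx]
      exact ih (fun d hd => hge d (List.mem_cons_of_mem _ hd)) hp.of_cons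
    · rw [List.dropWhile_cons, if_neg hx]
      intro hmem
      have hxc : x ≠ c := by simpa using hx
      have hcx : c ≤ x := hge x (List.mem_cons_self)
      rcases List.mem_cons.mp hmem with h | h
      · exact hxc h.symm
      · have := (List.pairwise_cons.mp hp).1 c h
        have : x = c := le_antisymm this hcx
        exact hxc this

-- the scan's jc on a sorted list is the count of 'J' (when joker), else 0
theorem pvScan_fst (joker : Bool) :
    ∀ n (s : List Char), s.length ≤ n → s.Pairwise (· ≤ ·) →
      (pvScan joker s).1 = (if joker && s.contains 'J' then (s.count 'J' : Int) else 0) := by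
  intro n
  induction n with
  | zero =>
    intro s hl _
    have : s = [] := List.eq_nil_of_length_eq_zero (Nat.le_zero.mp hl)
    subst this
    simp [pvScan]
  | succ m ih =>
    intro s hl hp
    match s with
    | [] => simp [pvScan]
    | c :: t =>
      have hge : ∀ d ∈ t, c ≤ d := (List.pairwise_cons.mp hp).1
      have hpt : t.Pairwise (· ≤ ·) := hp.of_cons
      have hsplit : t.takeWhile (fun d => d == c) ++ t.dropWhile (fun d => d == c) = t :=
        List.takeWhile_append_dropWhile
      have hnc : c ∉ t.dropWhile (fun d => d == c) := not_mem_dropWhile_beq c t hge hpt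
      have hrun : ∀ d ∈ t.takeWhile (fun d => d == c), d = c := by
        intro d hd
        have := List.mem_takeWhile_imp hd
        simpa using this
      have hrest_len : (t.dropWhile (fun d => d == c)).length ≤ m := by
        have h1 := List.length_dropWhile_le (fun d => d == c) t
        have h2 : t.length + 1 ≤ m + 1 := by simpa using hl
        omega
      have hrest_p : (t.dropWhile (fun d => d == c)).Pairwise (· ≤ ·) :=
        List.Pairwise.sublist (List.dropWhile_sublist _) hpt
      have hcount_c : (c :: t).count c = (t.takeWhile (fun d => d == c)).length + 1 := by
        rw [List.count_cons_self]
        have ht : t.count c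
            = (t.takeWhile (fun d => d == c)).count c + (t.dropWhile (fun d => d == c)).count c := by
          conv_lhs => rw [← hsplit]
          rw [List.count_append]
        have h1 : (t.takeWhile (fun d => d == c)).count c = (t.takeWhile (fun d => d == c)).length :=
          List.count_eq_length.mpr (fun d hd => by simp [hrun d hd])
        have h2 : (t.dropWhile (fun d => d == c)).count c = 0 :=
          List.count_eq_zero.mpr hnc
        omega
      have hcount_ne : ∀ d, d ≠ c → (c :: t).count d = (t.dropWhile (fun d => d == c)).count d := by
        intro d hd
        have hcc : (c :: t).count d = t.count d := by
          simp [Ne.symm hd]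
        rw [hcc]
        have ht : t.count d
            = (t.takeWhile (fun d => d == c)).count d + (t.dropWhile (fun d => d == c)).count d := by
          conv_lhs => rw [← hsplit]
          rw [List.count_append]
        have h3 : (t.takeWhile (fun d => d == c)).count d = 0 :=
          List.count_eq_zero.mpr (fun hmem => hd (hrun d hmem))
        omega
      have hmem_ne : ∀ d, d ≠ c → (d ∈ (c :: t) ↔ d ∈ t.dropWhile (fun d => d == c)) := by
        intro d hd
        constructor
        · intro h
          rcases List.mem_cons.mp h with h | h
          · exact absurd h hd
          · rw [← hsplit] at h
            rcases List.mem_append.mp h with h | h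
            · exact absurd (hrun d h) hd
            · exact h
        · intro h
          exact List.mem_cons_of_mem _ (hsplit ▸ List.mem_append.mpr (Or.inr h))
      by_cases hb : (joker && (c == 'J')) = true
      · have hj : joker = true := (Bool.and_eq_true_iff.mp hb).1
        have hcJ : c = 'J' := by simpa using (Bool.and_eq_true_iff.mp hb).2
        rw [pvScan, if_pos hb]
        have hmem : ('J' ∈ (c :: t)) := hcJ ▸ List.mem_cons_self
        simp only [hj, Bool.true_and, List.contains_eq_mem, hmem, decide_true, if_true]
        subst hcJ
        rw [hcount_c]
        push_cast
        ring
      · rw [pvScan, if_neg hb]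
        rw [ih _ hrest_len hrest_p]
        by_cases hj : joker = true
        · have hcJ : c ≠ 'J' := by
            intro h
            exact hb (by simp [hj, h])
          have hm' : ('J' ∈ (c :: t)) ↔ 'J' ∈ t.dropWhile (fun d => d == c) :=
            hmem_ne 'J' (Ne.symm hcJ)
          simp only [hj, Bool.true_and, List.contains_eq_mem]
          by_cases hJ : 'J' ∈ (c :: t)
          · rw [if_pos (decide_eq_true hJ), if_pos (decide_eq_true (hm'.mp hJ))]
            rw [hcount_ne 'J' (Ne.symm hcJ)]
          · rw [if_neg (fun h => hJ (of_decide_eq_true h)),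
                if_neg (fun h => hJ (hm'.mpr (of_decide_eq_true h)))]
        · have hjf : joker = false := by simpa using hj
          simp [hjf]

-- the scan's counts on a sorted list: one entry per distinct non-excluded card, its count
theorem pvScan_snd (joker : Bool) :
    ∀ n (s : List Char), s.length ≤ n → s.Pairwise (· ≤ ·) →
      ∀ (K : List Char), K.Nodup → (∀ d, d ∈ K ↔ d ∈ s) →
        (pvScan joker s).2.Perm
          ((K.filter (fun d => !(joker && d == 'J'))).map (fun d => (s.count d : Int))) := by
  intro n
  induction n with
  | zero =>
    intro s hl _ K hK hKm
    have hs : s = [] := List.eq_nil_of_length_eq_zero (Nat.le_zero.mp hl)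
    subst hs
    have : K = [] := List.eq_nil_iff_forall_not_mem.mpr (fun d hd => by simpa using (hKm d).mp hd)
    subst this
    simp [pvScan]
  | succ m ih =>
    intro s hl hp K hK hKm
    match s with
    | [] =>
      have : K = [] := List.eq_nil_iff_forall_not_mem.mpr (fun d hd => by simpa using (hKm d).mp hd)
      subst this
      simp [pvScan]
    | c :: t =>
      have hge : ∀ d ∈ t, c ≤ d := (List.pairwise_cons.mp hp).1
      have hpt : t.Pairwise (· ≤ ·) := hp.of_cons
      have hsplit : t.takeWhile (fun d => d == c) ++ t.dropWhile (fun d => d == c) = t :=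
        List.takeWhile_append_dropWhile
      have hnc : c ∉ t.dropWhile (fun d => d == c) := not_mem_dropWhile_beq c t hge hpt
      have hrun : ∀ d ∈ t.takeWhile (fun d => d == c), d = c := by
        intro d hd
        have := List.mem_takeWhile_imp hd
        simpa using this
      have hrest_len : (t.dropWhile (fun d => d == c)).length ≤ m := by
        have h1 := List.length_dropWhile_le (fun d => d == c) t
        have h2 : t.length + 1 ≤ m + 1 := by simpa using hl
        omega
      have hrest_p : (t.dropWhile (fun d => d == c)).Pairwise (· ≤ ·) :=
        List.Pairwise.sublist (List.dropWhile_sublist _) hpt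
      have hcount_c : (c :: t).count c = (t.takeWhile (fun d => d == c)).length + 1 := by
        rw [List.count_cons_self]
        have ht : t.count c
            = (t.takeWhile (fun d => d == c)).count c + (t.dropWhile (fun d => d == c)).count c := by
          conv_lhs => rw [← hsplit]
          rw [List.count_append]
        have h1 : (t.takeWhile (fun d => d == c)).count c = (t.takeWhile (fun d => d == c)).length :=
          List.count_eq_length.mpr (fun d hd => by simp [hrun d hd])
        have h2 : (t.dropWhile (fun d => d == c)).count c = 0 :=
          List.count_eq_zero.mpr hnc
        omega
      have hcount_ne : ∀ d, d ≠ c → (c :: t).count d = (t.dropWhile (fun d => d == c)).count d := by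
        intro d hd
        have hcc : (c :: t).count d = t.count d := by
          simp [Ne.symm hd]
        rw [hcc]
        have ht : t.count d
            = (t.takeWhile (fun d => d == c)).count d + (t.dropWhile (fun d => d == c)).count d := by
          conv_lhs => rw [← hsplit]
          rw [List.count_append]
        have h3 : (t.takeWhile (fun d => d == c)).count d = 0 :=
          List.count_eq_zero.mpr (fun hmem => hd (hrun d hmem))
        omega
      have hmem_ne : ∀ d, d ≠ c → (d ∈ (c :: t) ↔ d ∈ t.dropWhile (fun d => d == c)) := by
        intro d hd
        constructor
        · intro h
          rcases List.mem_cons.mp h with h | h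
          · exact absurd h hd
          · rw [← hsplit] at h
            rcases List.mem_append.mp h with h | h
            · exact absurd (hrun d h) hd
            · exact h
        · intro h
          exact List.mem_cons_of_mem _ (hsplit ▸ List.mem_append.mpr (Or.inr h))
      -- the residual key set
      have hcK : c ∈ K := (hKm c).mpr List.mem_cons_self
      have hK' : (K.erase c).Nodup := hK.erase c
      have hK'm : ∀ d, d ∈ K.erase c ↔ d ∈ t.dropWhile (fun d => d == c) := by
        intro d
        rw [hK.mem_erase_iff]
        constructor
        · rintro ⟨hne, hd⟩
          exact (hmem_ne d hne).mp ((hKm d).mp hd)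
        · intro hd
          have hne : d ≠ c := fun h => hnc (h ▸ hd)
          exact ⟨hne, (hKm d).mpr ((hmem_ne d hne).mpr hd)⟩
      have hIH := ih _ hrest_len hrest_p (K.erase c) hK' hK'm
      -- counts of survivors agree between rest and c::t
      have hmap_eq :
          ((K.erase c).filter (fun d => !(joker && d == 'J'))).map
              (fun d => ((t.dropWhile (fun d => d == c)).count d : Int))
            = ((K.erase c).filter (fun d => !(joker && d == 'J'))).map
              (fun d => ((c :: t).count d : Int)) := by
        apply List.map_congr_left
        intro d hd
        have hdK : d ∈ K.erase c := List.mem_of_mem_filter hd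
        have hne : d ≠ c := (hK.mem_erase_iff.mp hdK).1
        rw [hcount_ne d hne]
      have hKperm : K.Perm (c :: K.erase c) := List.perm_cons_erase hcK
      have hfperm : (K.filter (fun d => !(joker && d == 'J'))).Perm
          ((c :: K.erase c).filter (fun d => !(joker && d == 'J'))) := hKperm.filter _
      by_cases hb : (joker && (c == 'J')) = true
      · rw [pvScan, if_pos hb]
        have hfil : ((c :: K.erase c).filter (fun d => !(joker && d == 'J')))
            = (K.erase c).filter (fun d => !(joker && d == 'J')) :=
          List.filter_cons_of_neg (by simp [hb])
        refine hIH.trans ?_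
        rw [hmap_eq]
        exact ((hfperm.trans (List.Perm.of_eq hfil)).map _).symm
      · rw [pvScan, if_neg hb]
        have hbf : (joker && (c == 'J')) = false := by simpa using hb
        have hcons : ((c :: K.erase c).filter (fun d => !(joker && d == 'J')))
            = c :: (K.erase c).filter (fun d => !(joker && d == 'J')) :=
          List.filter_cons_of_pos (by simp [hbf])
        have hhead : (((t.takeWhile (fun d => d == c)).length : Int) + 1) = ((c :: t).count c : Int) := by
          rw [hcount_c]; push_cast; ring
        refine List.Perm.trans ?_ ((hfperm.trans (List.Perm.of_eq hcons)).map _).symm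
        rw [List.map_cons, hhead]
        exact (hIH.trans (List.Perm.of_eq hmap_eq)).cons _

-- the two ports agree on every input
theorem hand_combo_eq_alt (cards : String) (joker : Bool) :
    hand_combo cards joker = hand_combo_alt cards joker := by
  unfold hand_combo hand_combo_alt
  dsimp only
  set cl := cards.toList with hcl
  set S := PySem.Set.ofList cl with hS
  set f : Char → Int := fun c => (cl.count c : Int) with hf
  set s : List Char := PySem.List.sorted cl (fun c => c) false with hs
  have hperm_s : s.Perm cl := PySem.List.sorted_perm cl _ false
  have hsp : s.Pairwise (· ≤ ·) := by
    have := PySem.List.sorted_pairwise cl (fun c : Char => c)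
    simpa using this
  have hcount_s : ∀ d, s.count d = cl.count d := fun d => hperm_s.count_eq d
  have hSnd : S.Nodup := PySem.Set.nodup_ofList cl
  have hSm : ∀ d, d ∈ S ↔ d ∈ s := by
    intro d
    rw [PySem.Set.mem_ofList, hperm_s.mem_iff]
  have hsnd := pvScan_snd joker s.length s le_rfl hsp S hSnd hSm
  have hfst := pvScan_fst joker s.length s le_rfl hsp
  have hmapf : ∀ (L : List Char), L.map (fun d => (s.count d : Int)) = L.map f := by
    intro L
    apply List.map_congr_left
    intro d _
    simp [hf, hcount_s d]
  by_cases hcond : 'J' ∈ cl ∧ joker = true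
  case neg =>
    -- non-joker path on both sides
    have hA : (cl.contains 'J' && joker) = false := by
      simp only [Bool.and_eq_false_iff, List.contains_eq_mem, decide_eq_false_iff_not]
      by_cases hj : joker = true
      · exact Or.inl (fun h => hcond ⟨h, hj⟩)
      · exact Or.inr (by simpa using hj)
    have hjc0 : (pvScan joker s).1 = 0 := by
      rw [hfst]
      by_cases hj : joker = true
      · have hJ : 'J' ∉ s := fun h => hcond ⟨hperm_s.mem_iff.mp h, hj⟩
        simp [hj, List.contains_eq_mem, hJ]
      · simp [(by simpa using hj : joker = false)]
    have hfilt : S.filter (fun d => !(joker && d == 'J')) = S := by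
      apply List.filter_eq_self.mpr
      intro d hd
      by_cases hj : joker = true
      · have : d ≠ 'J' := by
          intro h
          exact hcond ⟨by
            have := (hSm d).mp hd
            rw [hperm_s.mem_iff] at this
            exact h ▸ this, hj⟩
        simp [hj, this]
      · simp [(by simpa using hj : joker = false)]
    rw [hA]
    simp only [Bool.false_eq_true, if_false]
    rw [hjc0, if_neg (by simp : ¬ ((0:Int) ≠ 0))]
    have hperm2 : (pvScan joker s).2.Perm (S.map f) := by
      have := hsnd
      rw [hfilt, hmapf S] at this
      exact this
    rw [sortedDesc_eq_of_perm _ _ hperm2]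
  case pos =>
    obtain ⟨hJ, hj⟩ := hcond
    have hA : (cl.contains 'J' && joker) = true := by
      simp [hj, List.contains_eq_mem, hJ]
    have hcount : 0 < cl.count 'J' := List.count_pos_iff.mpr hJ
    set val : Int := (cl.count 'J' : Int) with hval_def
    have hjc : (pvScan joker s).1 = val := by
      rw [hfst]
      have hJs : 'J' ∈ s := hperm_s.mem_iff.mpr hJ
      simp [hj, List.contains_eq_mem, hJs, hcount_s]
      rw [hval_def]
    have hvne : val ≠ 0 := by simp only [hval_def]; exact_mod_cast hcount.ne'
    rw [hA]
    simp only [if_true, hjc, if_pos hvne]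
    set restM : List Int := (S.filter (fun k => k != 'J')).map f with hrestM
    have hJS : 'J' ∈ S := (hSm 'J').mpr (hperm_s.mem_iff.mpr hJ)
    have hval : val ∈ S.map f := List.mem_map.mpr ⟨'J', hJS, rfl⟩
    have hpermB : (pvScan joker s).2.Perm restM := by
      have := hsnd
      rw [hmapf] at this
      have hpred : (S.filter (fun d => !(joker && d == 'J'))) = S.filter (fun k => k != 'J') := by
        apply List.filter_congr
        intro d _
        simp [hj, bne]
      rwa [hpred] at this
    have hperm1 : (S.map f).Perm (val :: restM) := by
      have h1 : (S.map f).Perm (('J' :: S.erase 'J').map f) := (List.perm_cons_erase hJS).map f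
      rwa [List.map_cons, hSnd.erase_eq_filter 'J'] at h1
    have hperm2 : ((S.map f).set ((PySem.List.index? (S.map f) val).getD 0) 0).Perm (restM ++ [0]) := by
      refine (set_index_zero_perm _ val hval).trans ?_
      have he : ((S.map f).erase val).Perm restM :=
        ((List.perm_cons_erase hval).symm.trans hperm1).cons_inv
      exact (he.cons 0).trans (List.perm_append_singleton 0 restM).symm
    have hMnonneg : ∀ x ∈ restM, (0:Int) ≤ x := by
      intro x hx
      obtain ⟨c, _, rfl⟩ := List.mem_map.mp hx
      positivity
    have hAs : PySem.List.sorted ((S.map f).set ((PySem.List.index? (S.map f) val).getD 0) 0) (fun x => x) true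
        = PySem.List.sorted restM (fun x => x) true ++ [0] :=
      (sortedDesc_eq_of_perm _ _ hperm2).trans (sortedDesc_append_zero restM hMnonneg)
    rw [hAs, sortedDesc_eq_of_perm _ _ hpermB]
    have hlenS : (S.map f).length = restM.length + 1 := by
      simpa using hperm1.length_eq
    have hlenN : S.length ≤ cl.length := ofList_length_le cl
    have hlenrest : (PySem.List.sorted restM (fun x => x) true).length = restM.length :=
      PySem.List.length_sorted restM _ true
    rcases hrest : PySem.List.sorted restM (fun x => x) true with _ | ⟨r0, rtl⟩
    · -- all cards are jokers: rest empty
      have hM0 : restM.length = 0 := by rw [← hlenrest, hrest]; rfl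
      have hn : restM.length + 1 ≤ cl.length := by
        simp only [List.length_map] at hlenS
        omega
      simp only [List.nil_append, PySem.List.length_pySetD]
      norm_num [PySem.List.pySetD, PySem.List.pySet?, PySem.List.pyGetD, PySem.List.pyGet?,
        PySem.List.pyIdx?, if_neg hvne]
    · have hM0 : restM.length = rtl.length + 1 := by rw [← hlenrest, hrest]; rfl
      have hn : rtl.length + 2 ≤ cl.length := by
        simp only [List.length_map] at hlenS
        omega
      have hge : (0:Int) ≤ (rtl.length : Int) + 1 := by positivity
      simp only [List.cons_append, PySem.List.length_pySetD]
      norm_num [PySem.List.pySetD, PySem.List.pySet?, PySem.List.pyGetD, PySem.List.pyGet?,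
        PySem.List.pyIdx?, if_neg hvne, hge]
      have h2 : cl.length - (rtl.length + 1) = (cl.length - (rtl.length + 1 + 1)) + 1 := by omega
      rw [h2, List.replicate_succ]

-- ===== VERDICT (by name: the statement is the Claim_ definition above) =====
theorem hand_combo_spec : Claim_equal_hand_combo := by
  intro cards joker _
  exact hand_combo_eq_alt cards joker
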